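-- pv_equiv track=rewrite | github.com/brickee/HarveyNER | data_utils_cur_loc.py | generate_complexity
-- ===== SOURCE A (Python) =====
-- def generate_complexity(words, labels):
--     clues = ['and','&', 'at', '@', 'in', 'on', 'near', 'between', 'of']
--     easy = ['of']
--     medium = ['at', '@', 'in', 'on', 'near', 'between']
--     hard = ['and','&']
--     complexity = 0
--     for word, label in zip(words, labels):
--         if word.lower() in easy and label != 'O':
--             complexity = max(complexity, 1)
--         if word.lower() in medium and label != 'O':
--             complexity = max(complexity, 2)
--         if word.lower() in hard and label != 'O':
--             complexity = max(complexity, 3)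
--     return complexity
-- ===== SOURCE B (Python) =====
-- def generate_complexity(words, labels):
--     active = {w.lower() for w, l in zip(words, labels) if l != 'O'}
--     if any(w in active for w in ['and', '&']):
--         return 3
--     if any(w in active for w in ['at', '@', 'in', 'on', 'near', 'between']):
--         return 2
--     if any(w in active for w in ['of']):
--         return 1
--     return 0
-- ===== Notes on version B (the rewrite author's own statement) =====
-- stated objective: alternative
-- what changed: Replaces the per-word running-max loop with a two-phase plan: first build a set of lowercased words whose label is not 'O', then return 3/2/1/0 by testing the hard/medium/easy clue categories against that index in priority order.
import Mathlib
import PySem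

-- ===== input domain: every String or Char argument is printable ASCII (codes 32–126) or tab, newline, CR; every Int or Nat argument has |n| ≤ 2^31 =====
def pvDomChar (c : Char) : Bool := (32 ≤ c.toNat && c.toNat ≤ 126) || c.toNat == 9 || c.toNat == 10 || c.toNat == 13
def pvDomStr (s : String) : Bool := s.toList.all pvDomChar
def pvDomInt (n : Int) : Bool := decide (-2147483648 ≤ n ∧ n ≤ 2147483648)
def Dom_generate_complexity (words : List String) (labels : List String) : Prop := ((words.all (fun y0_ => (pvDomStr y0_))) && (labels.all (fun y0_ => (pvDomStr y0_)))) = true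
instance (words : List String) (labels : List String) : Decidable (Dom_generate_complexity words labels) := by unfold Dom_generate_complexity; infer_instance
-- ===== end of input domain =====

-- B builds a set index of active lowercased words once, then answers by testing the clue
-- categories against it in priority order — an alternative decomposition, same cost class.

-- ===== PORT A =====
def generate_complexity (words : List String) (labels : List String) : Int :=
  let easy := ["of"]
  let medium := ["at", "@", "in", "on", "near", "between"]
  let hard := ["and", "&"]
  (words.zip labels).foldl (fun complexity wl =>
    let c1 := if PySem.Str.lower wl.1 ∈ easy ∧ wl.2 ≠ "O" then max complexity 1 else complexity
    let c2 := if PySem.Str.lower wl.1 ∈ medium ∧ wl.2 ≠ "O" then max c1 2 else c1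
    if PySem.Str.lower wl.1 ∈ hard ∧ wl.2 ≠ "O" then max c2 3 else c2) 0

-- ===== PORT B =====
def generate_complexity_alt (words : List String) (labels : List String) : Int :=
  let active : PySem.Set String :=
    (words.zip labels).foldl
      (fun s wl => if wl.2 ≠ "O" then PySem.Set.add s (PySem.Str.lower wl.1) else s)
      PySem.Set.empty
  if ["and", "&"].any (fun w => PySem.Set.contains active w) then 3
  else if ["at", "@", "in", "on", "near", "between"].any (fun w => PySem.Set.contains active w) then 2
  else if ["of"].any (fun w => PySem.Set.contains active w) then 1
  else 0

-- ===== PRECONDITION & SPEC =====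
def Spec_generate_complexity (words : List String) (labels : List String) (out : Int) : Prop := out = generate_complexity_alt words labels
instance (words : List String) (labels : List String) (out : Int) : Decidable (Spec_generate_complexity words labels out) := by unfold Spec_generate_complexity; infer_instance

-- ===== CLAIM (what is proved, stated in full; the proofs are below) =====
def Claim_equal_generate_complexity : Prop := ∀ (words : List String) (labels : List String), Dom_generate_complexity words labels → Spec_generate_complexity words labels (generate_complexity words labels)

-- ===== LEMMAS AND PROOFS =====

-- per-pair hit test for a clue category
def pvHit (cat : List String) (p : String × String) : Bool :=
  decide (PySem.Str.lower p.1 ∈ cat) && decide (p.2 ≠ "O")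

-- the priority value of a zipped word/label list
def pvScore (l : List (String × String)) : Int :=
  if l.any (pvHit ["and", "&"]) then 3
  else if l.any (pvHit ["at", "@", "in", "on", "near", "between"]) then 2
  else if l.any (pvHit ["of"]) then 1
  else 0

theorem pvHit_iff (cat : List String) (p : String × String) :
    pvHit cat p = true ↔ (PySem.Str.lower p.1 ∈ cat ∧ p.2 ≠ "O") := by
  simp [pvHit]

theorem pvScore_single (p : String × String) :
    pvScore [p] = if pvHit ["and", "&"] p then 3 else if pvHit ["at", "@", "in", "on", "near", "between"] p then 2 else if pvHit ["of"] p then 1 else 0 := by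
  simp [pvScore]

theorem pvScore_cons (p : String × String) (l : List (String × String)) :
    pvScore (p :: l) = max (pvScore [p]) (pvScore l) := by
  simp only [pvScore, List.any_cons, List.any_nil, Bool.or_false]
  by_cases e1 : pvHit ["of"] p = true <;>
    by_cases e2 : pvHit ["at", "@", "in", "on", "near", "between"] p = true <;>
      by_cases e3 : pvHit ["and", "&"] p = true <;>
        (try simp only [Bool.not_eq_true] at e1 e2 e3) <;>
        simp only [e1, e2, e3, Bool.true_or, Bool.false_or] <;>
        (try simp only [reduceIte]) <;>
        split_ifs <;> first | omega | simp_all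

-- A's loop from accumulator c computes max c (pvScore l)
theorem pvFoldA_eq (l : List (String × String)) : ∀ c : Int, 0 ≤ c →
    l.foldl (fun complexity wl =>
      let c1 := if PySem.Str.lower wl.1 ∈ ["of"] ∧ wl.2 ≠ "O" then max complexity 1 else complexity
      let c2 := if PySem.Str.lower wl.1 ∈ ["at", "@", "in", "on", "near", "between"] ∧ wl.2 ≠ "O" then max c1 2 else c1
      if PySem.Str.lower wl.1 ∈ ["and", "&"] ∧ wl.2 ≠ "O" then max c2 3 else c2) c
    = max c (pvScore l) := by
  induction l with
  | nil => intro c hc; simp [pvScore]; omega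
  | cons p l ih =>
    intro c hc
    rw [List.foldl_cons, pvScore_cons, pvScore_single]
    simp only [pvHit_iff]
    split_ifs <;> rw [ih _ (by omega)] <;> omega

-- membership in B's active set
theorem pvMem_active (l : List (String × String)) : ∀ (s : PySem.Set String) (x : String),
    x ∈ l.foldl (fun s wl => if wl.2 ≠ "O" then PySem.Set.add s (PySem.Str.lower wl.1) else s) s
      ↔ x ∈ s ∨ ∃ p ∈ l, p.2 ≠ "O" ∧ PySem.Str.lower p.1 = x := by
  induction l with
  | nil => intro s x; simp
  | cons p l ih =>
    intro s x
    rw [List.foldl_cons]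
    by_cases h : p.2 ≠ "O"
    · rw [if_pos h, ih]
      simp only [PySem.Set.mem_add, List.mem_cons, or_assoc]
      constructor
      · rintro (hs | hx | ⟨q, hq, hO, hl⟩)
        · exact Or.inl hs
        · exact Or.inr ⟨p, Or.inl rfl, h, hx.symm⟩
        · exact Or.inr ⟨q, Or.inr hq, hO, hl⟩
      · rintro (hs | ⟨q, hq | hq, hO, hl⟩)
        · exact Or.inl hs
        · exact Or.inr (Or.inl (hq ▸ hl).symm)
        · exact Or.inr (Or.inr ⟨q, hq, hO, hl⟩)
    · rw [if_neg h, ih]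
      simp only [List.mem_cons]
      constructor
      · rintro (hs | ⟨q, hq, hO, hl⟩)
        · exact Or.inl hs
        · exact Or.inr ⟨q, Or.inr hq, hO, hl⟩
      · rintro (hs | ⟨q, hq | hq, hO, hl⟩)
        · exact Or.inl hs
        · exact absurd (hq ▸ hO) h
        · exact Or.inr ⟨q, hq, hO, hl⟩

-- category test against the active set equals the direct any over the list
theorem pvCat_eq (l : List (String × String)) (cat : List String) :
    cat.any (fun w => PySem.Set.contains
      (l.foldl (fun s wl => if wl.2 ≠ "O" then PySem.Set.add s (PySem.Str.lower wl.1) else s)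
        PySem.Set.empty) w)
    = l.any (pvHit cat) := by
  rw [Bool.eq_iff_iff]
  simp only [List.any_eq_true, PySem.Set.contains, List.contains_iff_mem,
    pvMem_active, pvHit, Bool.and_eq_true, decide_eq_true_iff, PySem.Set.empty]
  constructor
  · rintro ⟨w, hw, h | ⟨p, hp, hO, hl⟩⟩
    · simp at h
    · exact ⟨p, hp, hl ▸ hw, hO⟩
  · rintro ⟨p, hp, hcat, hO⟩
    exact ⟨PySem.Str.lower p.1, hcat, Or.inr ⟨p, hp, hO, rfl⟩⟩

-- ===== VERDICT (by name: the statement is the Claim_ definition above) =====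
theorem generate_complexity_spec : Claim_equal_generate_complexity := by
  intro words labels _
  unfold Spec_generate_complexity generate_complexity generate_complexity_alt
  simp only [pvCat_eq, pvFoldA_eq _ 0 le_rfl]
  unfold pvScore
  split_ifs <;> omega
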